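-- pv_equiv track=rewrite | github.com/sotkasotka/python | praktich/13/2/2.py | max_letter_count
-- ===== SOURCE A (Python) =====
-- def max_letter_count(text):
--
--     letter_counts = {}
--     for char in text.lower():
--         if char.isalpha():
--             letter_counts[char] = letter_counts.get(char, 0) + 1
--
--     if letter_counts:
--         return max(letter_counts.values())
--     else:
--         return 0
-- ===== SOURCE B (Python) =====
-- def max_letter_count(text):
--     letters = [c for c in text.lower() if c.isalpha()]
--
--     def go(xs):
--         if not xs:
--             return 0
--         c = xs[0]
--         rest = [x for x in xs if x != c]
--         count = len(xs) - len(rest)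
--         best_rest = go(rest)
--         return best_rest if best_rest > count else count
--
--     return go(letters)
-- ===== Notes on version B (the rewrite author's own statement) =====
-- stated objective: alternative
-- what changed: Replaces A's single-pass dict tally with a recursive partition: take the first remaining letter as pivot, obtain its count as the length drop when all its occurrences are filtered out, recurse on the rest, and combine with max; no dictionary or counting table is built.
import Mathlib
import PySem

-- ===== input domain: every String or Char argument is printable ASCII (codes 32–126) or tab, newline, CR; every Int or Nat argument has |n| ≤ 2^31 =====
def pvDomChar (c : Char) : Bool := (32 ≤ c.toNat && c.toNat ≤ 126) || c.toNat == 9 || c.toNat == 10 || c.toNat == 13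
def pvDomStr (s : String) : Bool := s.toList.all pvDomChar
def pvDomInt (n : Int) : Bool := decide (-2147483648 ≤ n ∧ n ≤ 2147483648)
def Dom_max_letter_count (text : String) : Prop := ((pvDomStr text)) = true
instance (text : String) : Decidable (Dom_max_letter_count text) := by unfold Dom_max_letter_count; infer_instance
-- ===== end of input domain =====

-- B replaces A's dict tally with a recursive partition (pivot = first letter, count = length drop
-- after filtering it out, recurse on the rest); alternative decomposition, not claimed faster.

-- ===== PORT A =====
def max_letter_count (text : String) : Int :=
  let d : PySem.Dict Char Int :=
    (PySem.Str.lower text).toList.foldl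
      (fun d c => if PySem.Chars.isalpha c then d.insert c (d.getD c 0 + 1) else d)
      PySem.Dict.empty
  match PySem.List.max? d.values (fun v => v) with
  | some m => m
  | none => 0

-- ===== PORT B =====
-- go(xs): pivot on xs[0], count it via the length drop of the pivot-free rest, recurse.
def pvGo : List Char → Int
  | [] => 0
  | c :: t =>
    let rest := (c :: t).filter (fun x => x != c)
    let count : Int := ((c :: t).length : Int) - (rest.length : Int)
    let best_rest := pvGo rest
    if best_rest > count then best_rest else count
termination_by xs => xs.length
decreasing_by
  rw [List.filter_cons_of_neg (by simp)]
  have := List.length_filter_le (fun x => x != c) t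
  simp only [List.length_cons]
  omega

def max_letter_count_alt (text : String) : Int :=
  let letters := (PySem.Str.lower text).toList.filter (fun c => PySem.Chars.isalpha c)
  pvGo letters

-- ===== PRECONDITION & SPEC =====
def Spec_max_letter_count (text : String) (out : Int) : Prop := out = max_letter_count_alt text
instance (text : String) (out : Int) : Decidable (Spec_max_letter_count text out) := by unfold Spec_max_letter_count; infer_instance

-- ===== CLAIM (what is proved, stated in full; the proofs are below) =====
def Claim_equal_max_letter_count : Prop := ∀ (text : String), Dom_max_letter_count text → Spec_max_letter_count text (max_letter_count text)

-- ===== LEMMAS AND PROOFS =====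

-- A's guarded counting fold over low is the Counter of the filtered list.
theorem pv_dict_eq_counter (low : List Char) :
    low.foldl (fun (d : PySem.Dict Char Int) c =>
        if PySem.Chars.isalpha c then d.insert c (d.getD c 0 + 1) else d)
      PySem.Dict.empty
    = PySem.Dict.counter (low.filter (fun c => PySem.Chars.isalpha c)) := by
  rw [← PySem.Dict.foldl_insert_getD_add_one_eq_counter, ← List.foldl_filter]

-- the values of Counter xs are the counts of its distinct elements, in first-occurrence order
theorem pv_values_counter (xs : List Char) :
    (PySem.Dict.counter xs).values
      = (PySem.Set.ofList xs).map (fun c => (xs.count c : Int)) := by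
  have h := PySem.Dict.items_counter (xs := xs)
  show ((PySem.Dict.counter xs).items).map (·.2) = _
  rw [h, List.map_map]; rfl

-- set-of-list commutes with filter
theorem pv_ofList_filter (p : Char → Bool) (xs : List Char) :
    PySem.Set.ofList (xs.filter p) = (PySem.Set.ofList xs).filter p := by
  induction xs with
  | nil => simp [PySem.Set.ofList_nil]
  | cons a t ih =>
    rcases hp : p a with _ | _
    · have hp' : ¬(p a = true) := by simp [hp]
      rw [List.filter_cons_of_neg hp', ih, PySem.Set.ofList_cons, List.filter_cons_of_neg hp',
        PySem.Set.discard, List.filter_filter]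
      apply List.filter_congr
      intro x _
      by_cases hx : x = a
      · subst hx; simp [hp]
      · simp [hx]
    · rw [List.filter_cons_of_pos hp, PySem.Set.ofList_cons, PySem.Set.ofList_cons, ih,
        List.filter_cons_of_pos hp, PySem.Set.discard, PySem.Set.discard,
        List.filter_filter, List.filter_filter]
      refine congrArg (a :: ·) ?_
      apply List.filter_congr
      intro x _
      rw [Bool.and_comm]

-- Counting and the length-drop trick: count c xs + |xs with c removed| = |xs|
theorem pv_count_add_length_filter (c : Char) (xs : List Char) :
    xs.count c + (xs.filter (fun x => x != c)).length = xs.length := by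
  induction xs with
  | nil => rfl
  | cons a t ih =>
    rw [List.count_cons, List.filter_cons]
    cases hb : a == c with
    | false =>
      have hbne : (a != c) = true := by simp [bne, hb]
      rw [if_pos hbne, List.length_cons]
      simp only [Bool.false_eq_true, if_false, List.length_cons]
      omega
    | true =>
      have hbne : ¬((a != c) = true) := by simp [bne, hb]
      rw [if_neg hbne]
      simp only [if_pos, List.length_cons]
      omega

theorem pv_count_eq_length_sub (c : Char) (xs : List Char) :
    (xs.count c : Int) = (xs.length : Int) - ((xs.filter (fun x => x != c)).length : Int) := by
  have h := pv_count_add_length_filter c xs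
  omega

-- removing the pivot does not change the count of a non-pivot letter
theorem pv_count_filter (x c : Char) (t : List Char) (h : (x != c) = true) :
    (t.filter (fun y => y != c)).count x = t.count x := by
  induction t with
  | nil => rfl
  | cons a t ih =>
    rw [List.filter_cons]
    by_cases ha : ((a != c) = true)
    · rw [if_pos ha, List.count_cons, List.count_cons, ih]
    · rw [if_neg ha, ih, List.count_cons]
      have hax : (a == x) = false := by
        simp only [bne_iff_ne, ne_eq, not_not] at ha h
        subst ha
        exact beq_eq_false_iff_ne.mpr (Ne.symm h)
      rw [hax]
      simp

-- step equations of pvGo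
theorem pvGo_nil : pvGo [] = 0 := by
  simp [pvGo]

theorem pvGo_cons (c : Char) (t : List Char) :
    pvGo (c :: t) =
      (if pvGo ((c :: t).filter (fun x => x != c))
          > ((c :: t).length : Int) - (((c :: t).filter (fun x => x != c)).length : Int)
        then pvGo ((c :: t).filter (fun x => x != c))
        else ((c :: t).length : Int) - (((c :: t).filter (fun x => x != c)).length : Int)) := by
  simp [pvGo]

-- Main lemma: pvGo computes the max of the counts of the distinct elements (0 on empty).
theorem pv_go_eq_max_aux (n : Nat) : ∀ xs : List Char, xs.length ≤ n →
    pvGo xs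
      = (match PySem.List.max? ((PySem.Set.ofList xs).map (fun c => (xs.count c : Int)))
              (fun v => v) with
        | some m => m
        | none => 0) := by
  induction n with
  | zero =>
    intro xs h
    have hx : xs = [] := by cases xs <;> simp_all
    subst hx
    simp [pvGo_nil, PySem.Set.ofList_nil, PySem.List.max?]
  | succ n ih =>
    intro xs h
    match xs with
    | [] => simp [pvGo_nil, PySem.Set.ofList_nil, PySem.List.max?]
    | c :: t =>
      have hrest : (c :: t).filter (fun x => x != c) = t.filter (fun x => x != c) := by
        rw [List.filter_cons_of_neg (by simp)]
      have hlen : (t.filter (fun x => x != c)).length ≤ n := by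
        have h1 := List.length_filter_le (fun x => x != c) t
        simp only [List.length_cons] at h
        omega
      have hih := ih (t.filter (fun x => x != c)) hlen
      -- distinct elements of c :: t = c followed by distinct elements of the pivot-free rest
      have hofl : PySem.Set.ofList (c :: t)
          = c :: PySem.Set.ofList (t.filter (fun x => x != c)) := by
        rw [PySem.Set.ofList_cons, pv_ofList_filter, PySem.Set.discard]
        rfl
      -- the tail counts can be taken in the pivot-free rest
      have htail : (PySem.Set.ofList (t.filter (fun x => x != c))).map
            (fun x => (((c :: t).count x : Int)))
          = (PySem.Set.ofList (t.filter (fun x => x != c))).map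
            (fun x => (((t.filter (fun x => x != c)).count x : Int))) := by
        apply List.map_congr_left
        intro x hx
        have hxr : x ∈ t.filter (fun x => x != c) := (PySem.Set.mem_ofList _ _).mp hx
        have hxc : (x != c) = true := (List.mem_filter.mp hxr).2
        have hcx : (c == x) = false := by
          simp only [bne_iff_ne, ne_eq] at hxc
          exact beq_eq_false_iff_ne.mpr (Ne.symm hxc)
        rw [List.count_cons, hcx, pv_count_filter x c t hxc]
        simp
      -- the head count is the length drop
      have hhead : (((c :: t).count c : Int))
          = ((c :: t).length : Int) - ((t.filter (fun x => x != c)).length : Int) := by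
        rw [pv_count_eq_length_sub c (c :: t), hrest]
      rw [pvGo_cons c t, hrest, hih, hofl, List.map_cons, htail, hhead]
      cases hvs : (PySem.Set.ofList (t.filter (fun x => x != c))).map
          (fun x => (((t.filter (fun x => x != c)).count x : Int))) with
      | nil =>
        simp only [PySem.List.max?, List.foldl_nil, List.foldl_cons]
        rw [if_neg (by
          have h1 := List.length_filter_le (fun x => x != c) t
          simp only [List.length_cons, not_lt, gt_iff_lt]
          omega)]
      | cons w ws =>
        simp only [PySem.List.max?_id_cons, List.foldl_cons]
        rw [List.foldl_assoc]
        by_cases hgt : ws.foldl max w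
            > ((c :: t).length : Int) - ((t.filter (fun x => x != c)).length : Int)
        · rw [if_pos hgt, max_eq_right hgt.le]
        · rw [if_neg hgt, max_eq_left (not_lt.mp hgt)]

theorem pv_go_eq_max (xs : List Char) :
    pvGo xs
      = (match PySem.List.max? ((PySem.Set.ofList xs).map (fun c => (xs.count c : Int)))
              (fun v => v) with
        | some m => m
        | none => 0) :=
  pv_go_eq_max_aux xs.length xs le_rfl

-- ===== VERDICT (by name: the statement is the Claim_ definition above) =====
theorem max_letter_count_spec : Claim_equal_max_letter_count := by
  intro text _
  show max_letter_count text = max_letter_count_alt text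
  rw [max_letter_count, max_letter_count_alt, pv_dict_eq_counter, pv_values_counter, pv_go_eq_max]
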